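-- pv_equiv track=rewrite | github.com/ceavinrufus/tubes-daspro | husn/ParsingConverting.py | convertCSVtoArr
-- ===== SOURCE A (Python) =====
-- def convertCSVtoArr(DataCSV) :
-- # Menghasilkan tuple yang terdiri dari jumlah baris, jumlah kolom, dan
-- # data dalam bentuk Array untuk diproses selanjutnya
--
-- # KAMUS LOKAL
-- #   baris, kolom, i : Integer
-- #   arrData : Array of String
-- #   row. column : Integer
--
-- # ALGORITMA FUNGSI/PROSEDUR
--     # Menemukan banyak baris dan kolom array
--     baris = 0
--     kolom = 0
--     for i in (DataCSV) :
--         if i == "\n" :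
--             baris += 1
--             kolom += 1
--         elif i == ';' :
--             kolom += 1
--     kolom = int(kolom/baris)
--
--     # Masukan data ke Array
--     arrData = [['' for j in range (kolom) ] for i in range (baris)]
--     column = 0
--     row = 0
--     for i in (DataCSV) :
--         if i == ';' :
--             column += 1
--         elif i == '\n' :
--             row += 1
--             column = 0
--         elif i != '"' :
--             arrData[row][column] += str(i)
--
--     return (baris, kolom, arrData)
-- ===== SOURCE B (Python) =====
-- def convertCSVtoArr(DataCSV):
--     # Dimensions from substring counts; rows/fields by split, written into a
--     # prefilled grid by index (out-of-range non-empty fields raise IndexError,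
--     # as in the original).
--     baris = DataCSV.count('\n')
--     kolom = (DataCSV.count(';') + baris) // baris
--     arrData = [['' for _ in range(kolom)] for _ in range(baris)]
--     segs = DataCSV.split('\n')
--     if segs[-1] == '':
--         segs = segs[:-1]
--     for r, seg in enumerate(segs):
--         for c, field in enumerate(seg.split(';')):
--             cleaned = field.replace('"', '')
--             if cleaned:
--                 arrData[r][c] = cleaned
--     return (baris, kolom, arrData)
-- ===== Notes on version B (the rewrite author's own statement) =====
-- stated objective: idiomatic
-- what changed: Replaces A's two character-by-character Python loops (manual counting state machine, then per-character cell appends with row/column registers) by substring counts for the dimensions and split('\n')/split(';') with whole-field replace/assignment into a prefilled grid.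
import Mathlib
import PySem

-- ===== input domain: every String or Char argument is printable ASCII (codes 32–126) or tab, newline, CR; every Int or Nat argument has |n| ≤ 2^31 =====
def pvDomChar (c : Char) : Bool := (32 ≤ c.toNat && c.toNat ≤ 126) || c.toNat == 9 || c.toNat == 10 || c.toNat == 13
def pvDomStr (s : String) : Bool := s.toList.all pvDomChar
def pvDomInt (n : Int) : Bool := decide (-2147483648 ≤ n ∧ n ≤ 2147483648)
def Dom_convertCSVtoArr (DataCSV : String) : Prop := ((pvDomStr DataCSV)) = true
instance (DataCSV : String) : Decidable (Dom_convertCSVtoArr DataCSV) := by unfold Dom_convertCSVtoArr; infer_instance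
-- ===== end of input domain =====

-- B replaces A's two character-by-character loops by substring counts for the dimensions and a
-- split-then-assign-by-index fill of a prefilled grid (idiomatic split/count formulation).


-- ===== PORT A =====
-- One step of A's second loop ('for i in DataCSV'), state (row, column, arrData).
-- Cells are built as List Char (Lean's own String.append is kernel-opaque) and turned into
-- Strings once, after the loop.  'none' is exactly Python's IndexError on
-- 'arrData[row][column] += str(i)' (excluded by Pre_).
def pvFillStep (st : Option (Nat × Nat × List (List (List Char)))) (i : Char) :
    Option (Nat × Nat × List (List (List Char))) :=
  match st with
  | none => none
  | some (row, column, arr) =>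
    if i = ';' then some (row, column + 1, arr)
    else if i = '\n' then some (row + 1, 0, arr)
    else if i ≠ '"' then
      match arr[row]? with
      | none => none
      | some r =>
        match r[column]? with
        | none => none
        | some s => some (row, column, arr.set row (r.set column (s ++ [i])))
    else some (row, column, arr)

def convertCSVtoArr (DataCSV : String) : Int × Int × List (List String) :=
  let cs := DataCSV.toList
  -- first loop: count rows (baris) and separators+newlines (kolom)
  let bk : Int × Int := cs.foldl
    (fun bk i => if i = '\n' then (bk.1 + 1, bk.2 + 1)
                 else if i = ';' then (bk.1, bk.2 + 1) else bk) (0, 0)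
  let baris : Int := bk.1
  -- kolom = int(kolom/baris): truncdiv is exact for these magnitudes; the 'baris = 0' guard
  -- totalizes Python's ZeroDivisionError (outside Pre_)
  let kolom : Int := if baris = 0 then 0 else PySem.Int.truncdiv bk.2 baris
  let arrData0 : List (List (List Char)) :=
    List.replicate baris.toNat (List.replicate kolom.toNat [])
  -- second loop: fill the array character by character
  match cs.foldl pvFillStep (some (0, 0, arrData0)) with
  | some (_, _, arr) => (baris, kolom, arr.map (fun r => r.map String.ofList))
  | none => (baris, kolom, [])   -- Python raises IndexError here (outside Pre_)

-- ===== PORT B =====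
-- One step of B's inner loop 'for c, field in enumerate(seg.split(';'))' at row r:
-- clean the field and assign arrData[r][c] if non-empty ('none' = IndexError, outside Pre_).
def pvBInner (r : Nat) (og : Option (List (List String))) (fc : List Char × Nat) :
    Option (List (List String)) :=
  match og with
  | none => none
  | some g =>
    let cl := PySem.Chars.replace fc.1 ['"'] []
    if cl = [] then some g
    else match g[r]? with
      | none => none
      | some row =>
        if fc.2 < row.length then some (g.set r (row.set fc.2 (String.ofList cl))) else none

-- One step of B's outer loop 'for r, seg in enumerate(segs)'.
def pvBOuter (og : Option (List (List String))) (sr : List Char × Nat) :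
    Option (List (List String)) :=
  match og with
  | none => none
  | some g => (PySem.Chars.splitOn sr.1 [';']).zipIdx.foldl (pvBInner sr.2) (some g)

def convertCSVtoArr_alt (DataCSV : String) : Int × Int × List (List String) :=
  let cs := DataCSV.toList
  let baris : Int := (PySem.Chars.count cs ['\n'] : Int)
  -- the 'baris = 0' guard totalizes Python's ZeroDivisionError (outside Pre_)
  let kolom : Int := if baris = 0 then 0
    else PySem.Int.floordiv ((PySem.Chars.count cs [';'] : Int) + baris) baris
  let arrData : List (List String) := List.replicate baris.toNat (List.replicate kolom.toNat "")
  let segs0 := PySem.Chars.splitOn cs ['\n']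
  let segs := if segs0.getLast? = some [] then segs0.dropLast else segs0
  match segs.zipIdx.foldl pvBOuter (some arrData) with
  | some g => (baris, kolom, g)
  | none => (baris, kolom, [])   -- Python raises IndexError here (outside Pre_)

-- ===== PRECONDITION & SPEC =====
-- Structural single-character split (s.split(ch)); used by Pre_ to describe the input's
-- line/field shape without running either port.
def pvSplit (ch : Char) : List Char → List (List Char)
  | [] => [[]]
  | c :: t => if c = ch then [] :: pvSplit ch t else (pvSplit ch t).modifyHead (c :: ·)

-- Pre_ = exactly the inputs on which the Python A returns: at least one newline (else
-- ZeroDivisionError), in each full line every field with index ≥ kolom holds only '"'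
-- characters, and the text after the last newline holds only ';' and '"' (else IndexError).
def Pre_convertCSVtoArr (DataCSV : String) : Prop :=
  let cs := DataCSV.toList
  let baris := cs.count '\n'
  let kolom := (cs.count ';' + cs.count '\n') / baris
  let segs := pvSplit '\n' cs
  1 ≤ baris ∧
  (∀ seg ∈ segs.take baris, ∀ f ∈ (pvSplit ';' seg).drop kolom, f.all (· == '"') = true) ∧
  (∀ f ∈ pvSplit ';' (segs.getLastD []), f.all (· == '"') = true)

instance (DataCSV : String) : Decidable (Pre_convertCSVtoArr DataCSV) := by
  unfold Pre_convertCSVtoArr; infer_instance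

def pvWitness_convertCSVtoArr : String := "a;b\nc;\"d\"\n"

def Spec_convertCSVtoArr (DataCSV : String) (out : Int × Int × List (List String)) : Prop :=
  out = convertCSVtoArr_alt DataCSV
instance (DataCSV : String) (out : Int × Int × List (List String)) :
    Decidable (Spec_convertCSVtoArr DataCSV out) := by unfold Spec_convertCSVtoArr; infer_instance

-- ===== CLAIM (what is proved, stated in full; the proofs are below) =====
def Claim_equal_convertCSVtoArr : Prop := ∀ (DataCSV : String), Dom_convertCSVtoArr DataCSV →
  Pre_convertCSVtoArr DataCSV → Spec_convertCSVtoArr DataCSV (convertCSVtoArr DataCSV)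

-- ===== LEMMAS AND PROOFS =====

-- ---- basics about pvSplit ----
theorem pvSplit_ne_nil (ch : Char) (l : List Char) : pvSplit ch l ≠ [] := by
  induction l with
  | nil => simp [pvSplit]
  | cons c t ih =>
    simp only [pvSplit]
    split
    · simp
    · cases h : pvSplit ch t with
      | nil => exact absurd h ih
      | cons a b => simp [List.modifyHead]

theorem pvSplit_of_not_mem (ch : Char) (l : List Char) (h : ch ∉ l) : pvSplit ch l = [l] := by
  induction l with
  | nil => simp [pvSplit]
  | cons c t ih =>
    simp only [List.mem_cons, not_or] at h
    simp [pvSplit, Ne.symm h.1, ih h.2, List.modifyHead]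

theorem pvSplit_append (ch : Char) (f rest : List Char) (h : ch ∉ f) :
    pvSplit ch (f ++ ch :: rest) = f :: pvSplit ch rest := by
  induction f with
  | nil => simp [pvSplit]
  | cons c t ih =>
    simp only [List.mem_cons, not_or] at h
    simp [pvSplit, Ne.symm h.1, ih h.2, List.modifyHead]

theorem pv_mem_split (ch : Char) (l : List Char) (h : ch ∈ l) :
    ∃ f rest, l = f ++ ch :: rest ∧ ch ∉ f := by
  induction l with
  | nil => simp at h
  | cons c t ih =>
    by_cases hc : c = ch
    · exact ⟨[], t, by simp [hc], by simp⟩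
    · have : ch ∈ t := by
        rcases List.mem_cons.mp h with h' | h'
        · exact absurd (Eq.symm h') hc
        · exact h'
      obtain ⟨f, rest, hfr, hnf⟩ := ih this
      refine ⟨c :: f, rest, by simp [hfr], fun hm => ?_⟩
      rcases List.mem_cons.mp hm with h' | h'
      · exact hc (Eq.symm h')
      · exact hnf h'

-- ---- bridges to PySem's fuel-based string primitives (singleton patterns) ----
theorem splitOn_go_singleton (c : Char) (l : List Char) :
    ∀ (fuel : Nat) (cur : List Char) (acc : List (List Char)), l.length ≤ fuel →
    PySem.Chars.splitOn.go [c] fuel l cur acc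
      = acc.reverse ++ (pvSplit c l).modifyHead (cur.reverse ++ ·) := by
  induction l with
  | nil =>
    intro fuel cur acc _
    cases fuel <;> simp [PySem.Chars.splitOn.go, pvSplit]
  | cons ch t ih =>
    intro fuel cur acc hf
    cases fuel with
    | zero => simp at hf
    | succ f =>
      simp only [PySem.Chars.splitOn.go]
      simp only [List.length_cons] at hf
      by_cases hc : c = ch
      · subst hc
        have hp : [c].isPrefixOf (c :: t) = true := by simp [List.isPrefixOf]
        rw [if_pos hp]
        simp only [List.length_cons, List.length_nil, Nat.zero_add, List.drop_succ_cons,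
          List.drop_zero]
        rw [ih f [] (cur.reverse :: acc) (by omega)]
        simp [pvSplit]; cases pvSplit c t <;> simp
      · have hp : [c].isPrefixOf (ch :: t) = false := by
          simp [List.isPrefixOf]; exact fun h => absurd h hc
        rw [if_neg (by simp [hp])]
        rw [ih f (ch :: cur) acc (by omega)]
        have hne := pvSplit_ne_nil c t
        have hcc : ¬ ch = c := fun h => hc h.symm
        cases hs : pvSplit c t with
        | nil => exact absurd hs hne
        | cons a b => simp [pvSplit, if_neg hcc, hs, List.modifyHead]

theorem splitOn_singleton (c : Char) (s : List Char) :
    PySem.Chars.splitOn s [c] = pvSplit c s := by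
  rw [PySem.Chars.splitOn, splitOn_go_singleton c s (s.length + 1) [] [] (by omega)]
  cases h : pvSplit c s with
  | nil => exact absurd h (pvSplit_ne_nil c s)
  | cons a b => simp

theorem replace_go_singleton (c : Char) (l : List Char) :
    ∀ (fuel : Nat) (acc : List Char), l.length ≤ fuel →
    PySem.Chars.replace.go [c] [] fuel l acc = acc.reverse ++ l.filter (· ≠ c) := by
  induction l with
  | nil => intro fuel acc _; cases fuel <;> simp [PySem.Chars.replace.go]
  | cons ch t ih =>
    intro fuel acc hf
    cases fuel with
    | zero => simp at hf
    | succ f =>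
      simp only [PySem.Chars.replace.go]
      simp only [List.length_cons] at hf
      by_cases hc : c = ch
      · subst hc
        have hp : [c].isPrefixOf (c :: t) = true := by simp [List.isPrefixOf]
        rw [if_pos hp]
        simp only [List.length_cons, List.length_nil, Nat.zero_add, List.drop_succ_cons,
          List.drop_zero, List.reverse_nil, List.nil_append]
        rw [ih f acc (by omega)]
        simp
      · have hp : [c].isPrefixOf (ch :: t) = false := by
          simp [List.isPrefixOf]; exact fun h => absurd h hc
        rw [if_neg (by simp [hp])]
        rw [ih f (ch :: acc) (by omega)]
        simp [Ne.symm hc]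

theorem replace_singleton (c : Char) (s : List Char) :
    PySem.Chars.replace s [c] [] = s.filter (· ≠ c) := by
  rw [PySem.Chars.replace, replace_go_singleton c s s.length [] (le_refl _)]
  simp

theorem count_go_singleton (c : Char) (l : List Char) :
    ∀ (fuel : Nat) (acc : Nat), l.length ≤ fuel →
    PySem.Chars.count.go [c] fuel l acc = acc + l.count c := by
  induction l with
  | nil => intro fuel acc _; cases fuel <;> simp [PySem.Chars.count.go]
  | cons ch t ih =>
    intro fuel acc hf
    cases fuel with
    | zero => simp at hf
    | succ f =>
      simp only [PySem.Chars.count.go]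
      simp only [List.length_cons] at hf
      by_cases hc : c = ch
      · subst hc
        have hp : [c].isPrefixOf (c :: t) = true := by simp [List.isPrefixOf]
        rw [if_pos hp]
        simp only [List.length_cons, List.length_nil, Nat.zero_add, List.drop_succ_cons,
          List.drop_zero]
        rw [ih f (acc + 1) (by omega)]
        simp; omega
      · have hp : [c].isPrefixOf (ch :: t) = false := by
          simp [List.isPrefixOf]; exact fun h => absurd h hc
        rw [if_neg (by simp [hp])]
        rw [ih f acc (by omega)]
        simp [Ne.symm hc]

theorem count_singleton (c : Char) (s : List Char) :
    PySem.Chars.count s [c] = s.count c := by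
  rw [PySem.Chars.count, count_go_singleton c s s.length 0 (le_refl _)]
  simp

-- ---- A's first loop is counting ----
theorem pvCountFold (cs : List Char) : ∀ (p : Int × Int),
    cs.foldl (fun bk i => if i = '\n' then (bk.1 + 1, bk.2 + 1)
                 else if i = ';' then (bk.1, bk.2 + 1) else bk) p
      = (p.1 + cs.count '\n', p.2 + cs.count ';' + cs.count '\n') := by
  induction cs with
  | nil => intro p; simp
  | cons c t ih =>
    intro p
    by_cases h1 : c = '\n'
    · subst h1
      simp only [List.foldl_cons, ih, List.count_cons]
      have : ((';' : Char) == '\n') = false := by decide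
      simp
      constructor <;> omega
    · by_cases h2 : c = ';'
      · subst h2
        simp only [List.foldl_cons, ih, List.count_cons]
        have : (('\n' : Char) == ';') = false := by decide
        simp [h1]
        omega
      · simp only [List.foldl_cons, ih, List.count_cons]
        simp [h1, h2, beq_iff_eq]

-- ---- proof-side evaluator shared by the two grid proofs ----
def pvCleaned (f : List Char) : List Char := f.filter (· ≠ '"')

def pvWriteF (r c : Nat) (g : List (List (List Char))) (f : List Char) :
    Option (List (List (List Char))) :=
  if pvCleaned f = [] then some g
  else match g[r]? with
    | none => none
    | some row => match row[c]? with
      | none => none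
      | some cell => some (g.set r (row.set c (cell ++ pvCleaned f)))

def pvProcLine (r : Nat) : Nat → List (List (List Char)) → List (List Char) →
    Option (List (List (List Char)))
  | _, g, [] => some g
  | c, g, f :: fs => match pvWriteF r c g f with
    | none => none
    | some g' => pvProcLine r (c + 1) g' fs

def pvProcRows : Nat → List (List (List Char)) → List (List Char) →
    Option (List (List (List Char)))
  | _, g, [] => some g
  | r, g, seg :: rest => match pvProcLine r 0 g (pvSplit ';' seg) with
    | none => none
    | some g' => pvProcRows (r + 1) g' rest

def pvGMap (g : List (List (List Char))) : List (List String) :=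
  g.map (fun row => row.map String.ofList)

theorem pvFillStep_none (l : List Char) : l.foldl pvFillStep none = none := by
  induction l with
  | nil => rfl
  | cons c t ih => simpa [pvFillStep] using ih

theorem pvBInner_none (r : Nat) (l : List (List Char × Nat)) :
    l.foldl (pvBInner r) none = none := by
  induction l with
  | nil => rfl
  | cons c t ih => simpa [pvBInner] using ih

theorem pvBOuter_none (l : List (List Char × Nat)) : l.foldl pvBOuter none = none := by
  induction l with
  | nil => rfl
  | cons c t ih => simpa [pvBOuter] using ih

-- ---- A's fill loop = pvProcLine / pvProcRows ----
theorem pvFieldLemma (f : List Char) (hs : ';' ∉ f) (hn : '\n' ∉ f) :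
    ∀ (r c : Nat) (g : List (List (List Char))),
    f.foldl pvFillStep (some (r, c, g)) = (pvWriteF r c g f).map (fun g' => (r, c, g')) := by
  induction f with
  | nil => intro r c g; simp [pvWriteF, pvCleaned]
  | cons ch t ih =>
    intro r c g
    simp only [List.mem_cons, not_or] at hs hn
    have ihs := ih hs.2 hn.2
    by_cases hq : ch = '"'
    · subst hq
      have hstep : pvFillStep (some (r, c, g)) '"' = some (r, c, g) := by
        simp [pvFillStep]
      rw [List.foldl_cons, hstep, ihs]
      have : pvCleaned ('"' :: t) = pvCleaned t := by simp [pvCleaned]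
      rw [pvWriteF, pvWriteF, this]
    · -- real character: cleaned = ch :: cleaned t ≠ []
      have hcs : ¬ ch = ';' := fun h => hs.1 (Eq.symm h)
      have hcn : ¬ ch = '\n' := fun h => hn.1 (Eq.symm h)
      have hcl : pvCleaned (ch :: t) = ch :: pvCleaned t := by
        simp [pvCleaned, hq]
      rw [List.foldl_cons]
      cases hgr : g[r]? with
      | none =>
        have hstep : pvFillStep (some (r, c, g)) ch = none := by
          simp [pvFillStep, hcs, hcn, hq, hgr]
        rw [hstep, pvFillStep_none, pvWriteF, hcl]
        simp [hgr]
      | some row =>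
        cases hrc : row[c]? with
        | none =>
          have hstep : pvFillStep (some (r, c, g)) ch = none := by
            simp [pvFillStep, hcs, hcn, hq, hgr, hrc]
          rw [hstep, pvFillStep_none, pvWriteF, hcl]
          simp [hgr, hrc]
        | some cell =>
          have hstep : pvFillStep (some (r, c, g)) ch
              = some (r, c, g.set r (row.set c (cell ++ [ch]))) := by
            simp [pvFillStep, hcs, hcn, hq, hgr, hrc]
          rw [hstep, ihs]
          have hrlt : r < g.length := by
            rcases Nat.lt_or_ge r g.length with h | h
            · exact h
            · rw [List.getElem?_eq_none_iff.mpr h] at hgr; exact absurd hgr (by simp)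
          have hclt : c < row.length := by
            rcases Nat.lt_or_ge c row.length with h | h
            · exact h
            · rw [List.getElem?_eq_none_iff.mpr h] at hrc; exact absurd hrc (by simp)
          have hA : pvWriteF r c g (ch :: t)
              = some (g.set r (row.set c (cell ++ ch :: pvCleaned t))) := by
            rw [pvWriteF, hcl]
            simp [hgr, hrc]
          have hB : pvWriteF r c (g.set r (row.set c (cell ++ [ch]))) t
              = some (g.set r (row.set c (cell ++ ch :: pvCleaned t))) := by
            by_cases hte : pvCleaned t = []
            · rw [pvWriteF, if_pos hte, hte]
            · rw [pvWriteF, if_neg hte]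
              have h1 : (g.set r (row.set c (cell ++ [ch])))[r]?
                  = some (row.set c (cell ++ [ch])) := by
                simp [hrlt]
              have h2 : (row.set c (cell ++ [ch]))[c]? = some (cell ++ [ch]) := by
                simp [hclt]
              simp [h1, h2, List.set_set]
          rw [hA, hB]

theorem pv_getLastD_congr {α : Type} (l : List α) (h : l ≠ []) (a b : α) :
    l.getLastD a = l.getLastD b := by
  rw [List.getLastD_eq_getLast?, List.getLastD_eq_getLast?]
  cases hq : l.getLast? with
  | none => exact absurd (List.getLast?_eq_none_iff.mp hq) h
  | some x => simp

theorem pvLineLemmaAux (n : Nat) : ∀ (seg : List Char), seg.length ≤ n → '\n' ∉ seg →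
    ∀ (r c : Nat) (g : List (List (List Char))),
    seg.foldl pvFillStep (some (r, c, g))
      = match pvProcLine r c g (pvSplit ';' seg) with
        | none => none
        | some g' => some (r, c + (pvSplit ';' seg).length - 1, g') := by
  induction n with
  | zero =>
    intro seg hl hn r c g
    have : seg = [] := List.length_eq_zero_iff.mp (by omega)
    subst this
    simp [pvSplit, pvProcLine, pvWriteF, pvCleaned]
  | succ m ih =>
    intro seg hl hn r c g
    by_cases hm : ';' ∈ seg
    · obtain ⟨f, rest, heq, hnf⟩ := pv_mem_split ';' seg hm
      subst heq
      have hnl : '\n' ∉ f := fun h => hn (by simp [h])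
      have hnr : '\n' ∉ rest := fun h => hn (by simp [h])
      rw [pvSplit_append ';' f rest hnf, List.foldl_append, pvFieldLemma f hnf hnl r c g]
      cases hw : pvWriteF r c g f with
      | none => simp [pvProcLine, hw, pvFillStep, pvFillStep_none]
      | some g' =>
        have hlen : rest.length ≤ m := by
          simp [List.length_append] at hl; omega
        have hstep : pvFillStep (some (r, c, g')) ';' = some (r, c + 1, g') := by
          simp [pvFillStep]
        simp only [Option.map_some, List.foldl_cons, hstep]
        rw [ih rest hlen hnr r (c + 1) g']
        simp only [pvProcLine, hw]
        cases hp : pvProcLine r (c + 1) g' (pvSplit ';' rest) with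
        | none => simp
        | some g'' =>
          have : pvSplit ';' rest ≠ [] := pvSplit_ne_nil ';' rest
          have hlp : 1 ≤ (pvSplit ';' rest).length := by
            cases h : pvSplit ';' rest with
            | nil => exact absurd h this
            | cons a b => simp
          simp only [List.length_cons]
          refine congrArg some (Prod.ext rfl (Prod.ext ?_ rfl))
          dsimp only
          omega
    · rw [pvSplit_of_not_mem ';' seg hm, pvFieldLemma seg hm hn r c g]
      cases hw : pvWriteF r c g seg with
      | none => simp [pvProcLine, hw]
      | some g' => simp [pvProcLine, hw]

theorem pvTopLemmaAux (n : Nat) : ∀ (cs : List Char), cs.length ≤ n →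
    ∀ (r : Nat) (g : List (List (List Char))),
    cs.foldl pvFillStep (some (r, 0, g))
      = match pvProcRows r g (pvSplit '\n' cs) with
        | none => none
        | some g' => some (r + (pvSplit '\n' cs).length - 1,
            (pvSplit ';' ((pvSplit '\n' cs).getLastD [])).length - 1, g') := by
  induction n with
  | zero =>
    intro cs hl r g
    have : cs = [] := List.length_eq_zero_iff.mp (by omega)
    subst this
    simp [pvSplit, pvProcRows, pvProcLine, pvWriteF, pvCleaned]
  | succ m ih =>
    intro cs hl r g
    by_cases hm : '\n' ∈ cs
    · obtain ⟨seg, rest, heq, hnf⟩ := pv_mem_split '\n' cs hm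
      subst heq
      rw [pvSplit_append '\n' seg rest hnf, List.foldl_append,
        pvLineLemmaAux seg.length seg (le_refl _) hnf r 0 g]
      cases hw : pvProcLine r 0 g (pvSplit ';' seg) with
      | none => simp [pvProcRows, hw, pvFillStep, pvFillStep_none]
      | some g' =>
        have hlen : rest.length ≤ m := by
          simp [List.length_append] at hl; omega
        have hstep : ∀ k, pvFillStep (some (r, k, g')) '\n' = some (r + 1, 0, g') := by
          intro k; simp [pvFillStep]
        simp only [List.foldl_cons, hstep]
        rw [ih rest hlen (r + 1) g']
        simp only [pvProcRows, hw]
        cases hp : pvProcRows (r + 1) g' (pvSplit '\n' rest) with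
        | none => simp
        | some g'' =>
          have hne : pvSplit '\n' rest ≠ [] := pvSplit_ne_nil '\n' rest
          have hlp : 1 ≤ (pvSplit '\n' rest).length := by
            cases h : pvSplit '\n' rest with
            | nil => exact absurd h hne
            | cons a b => simp
          simp only [List.length_cons, List.getLastD_cons]
          rw [pv_getLastD_congr _ hne seg []]
          refine congrArg some (Prod.ext ?_ rfl)
          dsimp only
          omega
    · rw [pvSplit_of_not_mem '\n' cs hm,
        pvLineLemmaAux cs.length cs (le_refl _) hm r 0 g]
      cases hw : pvProcLine r 0 g (pvSplit ';' cs) with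
      | none => simp [pvProcRows, hw]
      | some g' => simp [pvProcRows, hw]

def pvLineEmptyFrom (g : List (List (List Char))) (r c : Nat) : Prop :=
  ∀ row, g[r]? = some row → ∀ j, c ≤ j → ∀ cell, row[j]? = some cell → cell = []

def pvRowsEmptyFrom (g : List (List (List Char))) (r : Nat) : Prop :=
  ∀ i, r ≤ i → ∀ row, g[i]? = some row → ∀ cell ∈ row, cell = []

theorem pvProcLine_other_rows (r : Nat) (fields : List (List Char)) :
    ∀ (c : Nat) (g g' : List (List (List Char))), pvProcLine r c g fields = some g' →
    ∀ i, i ≠ r → g'[i]? = g[i]? := by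
  induction fields with
  | nil =>
    intro c g g' h i hi
    simp [pvProcLine] at h
    subst h; rfl
  | cons f fs ih =>
    intro c g g' h i hi
    rw [pvProcLine] at h
    cases hw : pvWriteF r c g f with
    | none => simp only [hw] at h; exact absurd h (by simp)
    | some g1 =>
      simp only [hw] at h
      rw [ih (c + 1) g1 g' h i hi]
      rw [pvWriteF] at hw
      by_cases he : pvCleaned f = []
      · rw [if_pos he] at hw
        cases hw; rfl
      · rw [if_neg he] at hw
        cases hgr : g[r]? with
        | none => simp only [hgr] at hw; exact absurd hw (by simp)
        | some row =>
          simp only [hgr] at hw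
          cases hrc : row[c]? with
          | none => simp only [hrc] at hw; exact absurd hw (by simp)
          | some cell =>
            simp only [hrc] at hw
            cases hw
            exact List.getElem?_set_ne (fun h => hi (Eq.symm h))

theorem pvBInner_some (r : Nat) (g : List (List String)) (f : List Char) (c : Nat) :
    pvBInner r (some g) (f, c)
      = if pvCleaned f = [] then some g
        else match g[r]? with
          | none => none
          | some row =>
            if c < row.length then some (g.set r (row.set c (String.ofList (pvCleaned f))))
            else none := by
  simp only [pvBInner, replace_singleton]
  rfl

theorem pvBLineLemma (r : Nat) (fields : List (List Char)) :
    ∀ (c : Nat) (g : List (List (List Char))), pvLineEmptyFrom g r c →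
    (fields.zipIdx c).foldl (pvBInner r) (some (pvGMap g))
      = (pvProcLine r c g fields).map pvGMap := by
  induction fields with
  | nil => intro c g _; simp [pvProcLine]
  | cons f fs ih =>
    intro c g hemp
    rw [List.zipIdx_cons, List.foldl_cons, pvBInner_some]
    by_cases he : pvCleaned f = []
    · rw [if_pos he, ih (c + 1) g (fun row hr j hj => hemp row hr j (by omega))]
      rw [pvProcLine]
      have : pvWriteF r c g f = some g := by rw [pvWriteF, if_pos he]
      rw [this]
    · rw [if_neg he]
      cases hgr : g[r]? with
      | none =>
        have hgr' : (pvGMap g)[r]? = none := by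
          simp [pvGMap, List.getElem?_map, hgr]
        simp only [hgr']
        rw [pvBInner_none, pvProcLine]
        have : pvWriteF r c g f = none := by
          rw [pvWriteF, if_neg he]; simp only [hgr]
        rw [this]
        simp
      | some row =>
        have hgr' : (pvGMap g)[r]? = some (row.map String.ofList) := by
          simp [pvGMap, List.getElem?_map, hgr]
        simp only [hgr']
        by_cases hc : c < row.length
        · obtain ⟨cell, hrc⟩ : ∃ cell, row[c]? = some cell :=
            ⟨row[c], List.getElem?_eq_getElem hc⟩
          have hcell : cell = [] :=
            hemp row hgr c (le_refl c) cell hrc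
          subst hcell
          rw [if_pos (by simpa using hc)]
          have hmap : (pvGMap g).set r ((row.map String.ofList).set c (String.ofList (pvCleaned f)))
              = pvGMap (g.set r (row.set c (pvCleaned f))) := by
            simp [pvGMap, List.map_set]
          rw [hmap]
          have hwf : pvWriteF r c g f = some (g.set r (row.set c (pvCleaned f))) := by
            rw [pvWriteF, if_neg he]
            simp only [hgr, hrc]
            simp
          rw [pvProcLine, hwf]
          refine ih (c + 1) _ ?_
          intro row' hr' j hj cell' hc'
          have hrlt : r < g.length := by
            rcases Nat.lt_or_ge r g.length with h | h
            · exact h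
            · rw [List.getElem?_eq_none_iff.mpr h] at hgr; exact absurd hgr (by simp)
          have hrows : (g.set r (row.set c (pvCleaned f)))[r]?
              = some (row.set c (pvCleaned f)) := by
            simp [hrlt]
          rw [hrows] at hr'
          cases hr'
          rw [List.getElem?_set_ne (by omega)] at hc'
          exact hemp row hgr j (by omega) cell' hc'
        · have hrc : row[c]? = none := List.getElem?_eq_none_iff.mpr (by omega)
          rw [if_neg (by simpa using hc)]
          have hwf : pvWriteF r c g f = none := by
            rw [pvWriteF, if_neg he]
            simp only [hgr, hrc]
          rw [pvBInner_none, pvProcLine, hwf]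
          simp

theorem pvBOuter_some (g : List (List String)) (seg : List Char) (r : Nat) :
    pvBOuter (some g) (seg, r)
      = ((pvSplit ';' seg).zipIdx 0).foldl (pvBInner r) (some g) := by
  simp only [pvBOuter, splitOn_singleton]

theorem pvBRowsLemma (segs : List (List Char)) :
    ∀ (r : Nat) (g : List (List (List Char))), pvRowsEmptyFrom g r →
    (segs.zipIdx r).foldl pvBOuter (some (pvGMap g))
      = (pvProcRows r g segs).map pvGMap := by
  induction segs with
  | nil => intro r g _; simp [pvProcRows]
  | cons seg rest ih =>
    intro r g hemp
    rw [List.zipIdx_cons, List.foldl_cons, pvBOuter_some]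
    have hline : pvLineEmptyFrom g r 0 := by
      intro row hr j _ cell hc
      exact hemp r (le_refl r) row hr cell (List.mem_of_getElem? hc)
    rw [pvBLineLemma r (pvSplit ';' seg) 0 g hline]
    rw [pvProcRows]
    cases hp : pvProcLine r 0 g (pvSplit ';' seg) with
    | none => simp [pvBOuter_none]
    | some g' =>
      simp only [Option.map_some]
      refine ih (r + 1) g' ?_
      intro i hi row hr cell hc
      rw [pvProcLine_other_rows r (pvSplit ';' seg) 0 g g' hp i (by omega)] at hr
      exact hemp i (by omega) row hr cell hc

theorem pvProcRows_empty_last (segs : List (List Char)) :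
    ∀ (r : Nat) (g : List (List (List Char))),
    pvProcRows r g (segs ++ [[]]) = pvProcRows r g segs := by
  induction segs with
  | nil =>
    intro r g
    simp [pvProcRows, pvSplit, pvProcLine, pvWriteF, pvCleaned]
  | cons seg rest ih =>
    intro r g
    rw [List.cons_append, pvProcRows, pvProcRows]
    cases hp : pvProcLine r 0 g (pvSplit ';' seg) with
    | none => rfl
    | some g' => exact ih (r + 1) g'

theorem pv_gmap_rep (n k : Nat) :
    pvGMap (List.replicate n (List.replicate k [])) = List.replicate n (List.replicate k "") := by
  simp [pvGMap, List.map_replicate]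

theorem pv_rows_empty_rep (n k : Nat) :
    pvRowsEmptyFrom (List.replicate n (List.replicate k [])) 0 := by
  intro i _ row hr cell hc
  have := List.mem_of_getElem? hr
  rw [List.eq_of_mem_replicate this] at hc
  exact List.eq_of_mem_replicate hc

theorem pv_main (s : String) : convertCSVtoArr s = convertCSVtoArr_alt s := by
  simp only [convertCSVtoArr, convertCSVtoArr_alt, pvCountFold s.toList (0, 0),
    count_singleton, splitOn_singleton, zero_add, Int.toNat_natCast]
  have hdiv : (if ((s.toList.count '\n' : Nat) : Int) = 0 then (0 : Int)
        else PySem.Int.truncdiv (((s.toList.count ';' : Nat) : Int) + ((s.toList.count '\n' : Nat) : Int)) ((s.toList.count '\n' : Nat) : Int))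
      = (if ((s.toList.count '\n' : Nat) : Int) = 0 then (0 : Int)
        else PySem.Int.floordiv (((s.toList.count ';' : Nat) : Int) + ((s.toList.count '\n' : Nat) : Int)) ((s.toList.count '\n' : Nat) : Int)) := by
    by_cases hb : ((s.toList.count '\n' : Nat) : Int) = 0
    · rw [if_pos hb, if_pos hb]
    · rw [if_neg hb, if_neg hb, PySem.Int.truncdiv,
        Int.tdiv_eq_ediv_of_nonneg (by positivity),
        PySem.Int.floordiv_eq_ediv_of_pos (by omega)]
  rw [hdiv]
  have htop := pvTopLemmaAux s.toList.length s.toList (le_refl _) 0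
    (List.replicate (s.toList.count '\n')
      ((if ((s.toList.count '\n' : Nat) : Int) = 0 then (0 : Int)
        else PySem.Int.floordiv (((s.toList.count ';' : Nat) : Int) + ((s.toList.count '\n' : Nat) : Int)) ((s.toList.count '\n' : Nat) : Int)).toNat |> (List.replicate · ([] : List Char))))
  rw [htop]
  rw [← pv_gmap_rep]
  have hsegs0 := pvSplit_ne_nil '\n' s.toList
  by_cases hq : (pvSplit '\n' s.toList).getLast? = some []
  · rw [if_pos hq]
    have hlast : pvSplit '\n' s.toList
        = (pvSplit '\n' s.toList).dropLast ++ [[]] := by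
      conv_lhs => rw [← List.dropLast_concat_getLast hsegs0]
      have : (pvSplit '\n' s.toList).getLast hsegs0 = [] := by
        rw [List.getLast_eq_iff_getLast?_eq_some]
        exact hq
      rw [this]
    rw [pvBRowsLemma _ 0 _ (pv_rows_empty_rep _ _)]
    conv_lhs => rw [hlast, pvProcRows_empty_last]
    cases hp : pvProcRows 0 (List.replicate (s.toList.count '\n')
        (List.replicate (if ((s.toList.count '\n' : Nat) : Int) = 0 then (0 : Int)
          else PySem.Int.floordiv (((s.toList.count ';' : Nat) : Int) + ((s.toList.count '\n' : Nat) : Int)) ((s.toList.count '\n' : Nat) : Int)).toNat []))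
        ((pvSplit '\n' s.toList).dropLast) with
    | none => simp
    | some g => simp [pvGMap]
  · rw [if_neg hq]
    rw [pvBRowsLemma _ 0 _ (pv_rows_empty_rep _ _)]
    cases hp : pvProcRows 0 (List.replicate (s.toList.count '\n')
        (List.replicate (if ((s.toList.count '\n' : Nat) : Int) = 0 then (0 : Int)
          else PySem.Int.floordiv (((s.toList.count ';' : Nat) : Int) + ((s.toList.count '\n' : Nat) : Int)) ((s.toList.count '\n' : Nat) : Int)).toNat []))
        (pvSplit '\n' s.toList) with
    | none => simp
    | some g => simp [pvGMap]

-- ===== VERDICT (by name: the statement is the Claim_ definition above) =====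
theorem convertCSVtoArr_spec : Claim_equal_convertCSVtoArr := by
  intro s _ _
  unfold Spec_convertCSVtoArr
  exact pv_main s
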